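-- pv_equiv track=rewrite | github.com/PaulCardoos/Fun-with-BSTs | python/dp/permutation.py | perms
-- ===== SOURCE A (Python) =====
-- def perms(n):
--     """
--     n -> list
--     output -> all possible permuatations
--     """
--
--     res = []
--     stack = []
--
--     def dfs(i):
--         if len(stack) == len(n):
--             #can use a boolean array to check if we have already used index
--             if len(set(stack.copy())) == 3:
--                 res.append(stack.copy())
--             return
--
--         for i in range(len(n)):
--             if(n[i]):
--                 stack.append(n[i])
--                 dfs(i + 1)
--                 stack.pop()
--     dfs(0)
--     return res
-- ===== SOURCE B (Python) =====
-- def perms(n):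
--     candidates = [x for x in n if x]
--     seqs = [[]]
--     for _ in range(len(n)):
--         seqs = [s + [c] for s in seqs for c in candidates]
--     return [s for s in seqs if len(set(s)) == 3]
-- ===== Notes on version B (the rewrite author's own statement) =====
-- stated objective: alternative
-- what changed: Replaces the recursive DFS with mutable stack/backtracking by an iterative breadth-first Cartesian-product build (seqs extended one position per round) followed by a single filter on the distinct-value count.
import Mathlib
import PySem

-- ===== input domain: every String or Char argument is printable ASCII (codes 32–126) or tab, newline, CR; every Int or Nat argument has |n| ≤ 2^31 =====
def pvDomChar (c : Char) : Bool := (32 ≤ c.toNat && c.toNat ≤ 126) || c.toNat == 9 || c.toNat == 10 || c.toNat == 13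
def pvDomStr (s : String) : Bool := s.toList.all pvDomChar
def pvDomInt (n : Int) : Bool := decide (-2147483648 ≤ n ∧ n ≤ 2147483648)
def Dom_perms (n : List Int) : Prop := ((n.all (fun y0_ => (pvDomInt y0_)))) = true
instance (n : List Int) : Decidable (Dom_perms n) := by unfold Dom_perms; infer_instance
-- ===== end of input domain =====

-- B replaces A's recursive DFS/backtracking by an iterative breadth-first product build plus
-- one final filter (alternative decomposition, same exponential cost).

-- ===== PORT A =====
-- dfs(i): the parameter i is unused in Python (the loop re-binds it); fuel = n.length - stack.length
-- is a termination guard only — the Python recursion terminates for the same reason.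
def permsDfs (n : List Int) (fuel : Nat) (stack : List Int) (res : List (List Int)) :
    List (List Int) :=
  if stack.length = n.length then
    if (PySem.Set.ofList stack).length = 3 then res ++ [stack] else res
  else
    match fuel with
    | 0 => res
    | Nat.succ fuel' =>
      (PySem.List.pyRange 0 (n.length : Int) 1).foldl
        (fun acc i =>
          let v := PySem.List.pyGetD n i 0
          if v ≠ 0 then permsDfs n fuel' (stack ++ [v]) acc else acc) res
termination_by fuel

def perms (n : List Int) : List (List Int) :=
  permsDfs n n.length [] []

-- ===== PORT B =====
def perms_alt (n : List Int) : List (List Int) :=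
  let candidates := n.filter (fun x => decide (x ≠ 0))
  let seqs := (List.range n.length).foldl
    (fun seqs _ => seqs.flatMap (fun s => candidates.map (fun c => s ++ [c]))) [[]]
  seqs.filter (fun s => decide ((PySem.Set.ofList s).length = 3))

-- ===== PRECONDITION & SPEC =====
def Spec_perms (n : List Int) (out : List (List Int)) : Prop := out = perms_alt n
instance (n : List Int) (out : List (List Int)) : Decidable (Spec_perms n out) := by unfold Spec_perms; infer_instance

-- ===== CLAIM (what is proved, stated in full; the proofs are below) =====
def Claim_equal_perms : Prop := ∀ (n : List Int), Dom_perms n → Spec_perms n (perms n)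

-- ===== LEMMAS AND PROOFS =====

-- all length-k sequences over C, head varying slowest (DFS order)
def prodSeqs (C : List Int) : Nat → List (List Int)
  | 0 => [[]]
  | k+1 => C.flatMap (fun c => (prodSeqs C k).map (c :: ·))

theorem prodSeqs_succ_right (C : List Int) (k : Nat) :
    prodSeqs C (k+1) = (prodSeqs C k).flatMap (fun s => C.map (fun c => s ++ [c])) := by
  induction k with
  | zero =>
    show C.flatMap (fun c => [[c]]) = [[]].flatMap (fun s => C.map (fun c => s ++ [c]))
    simp [List.map_eq_flatMap]
  | succ k ih =>
    show C.flatMap (fun c => (prodSeqs C (k+1)).map (c :: ·)) = _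
    conv_lhs => rw [ih]
    simp only [prodSeqs, List.map_flatMap, List.flatMap_assoc, List.flatMap_map,
      List.map_map, Function.comp_def, List.cons_append]

theorem foldl_filter_truthy {β : Type} (g : Int → β → β) :
    ∀ (m : List Int) (res : β),
      m.foldl (fun acc v => if v ≠ 0 then g v acc else acc) res
        = (m.filter (fun x => decide (x ≠ 0))).foldl (fun acc v => g v acc) res := by
  intro m
  induction m with
  | nil => intro res; rfl
  | cons x m ih =>
    intro res
    by_cases hx : x = 0
    · rw [List.foldl_cons, if_neg (not_not_intro hx), List.filter_cons,
        if_neg (by simp [hx])]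
      exact ih res
    · rw [List.foldl_cons, if_pos hx, List.filter_cons, if_pos (by simp [hx]),
        List.foldl_cons]
      exact ih (g x res)

theorem permsDfs_eq (n : List Int) :
    ∀ (k : Nat) (stack : List Int) (res : List (List Int)),
      stack.length + k = n.length →
      permsDfs n k stack res
        = res ++ ((prodSeqs (n.filter (fun x => decide (x ≠ 0))) k).map (stack ++ ·)).filter
            (fun s => decide ((PySem.Set.ofList s).length = 3)) := by
  intro k
  induction k with
  | zero =>
    intro stack res h0
    have h : stack.length = n.length := by omega
    rw [permsDfs, if_pos h]
    by_cases h3 : (PySem.Set.ofList stack).length = 3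
    · rw [if_pos h3]; simp [prodSeqs, h3]
    · rw [if_neg h3]; simp [prodSeqs, h3]
  | succ k ih =>
    intro stack res h
    rw [permsDfs]
    have hne : ¬ stack.length = n.length := by omega
    simp only [hne, if_false]
    rw [PySem.List.foldl_pyRange_zero_pyGetD' n 0
      (fun acc v => if v ≠ 0 then permsDfs n k (stack ++ [v]) acc else acc) res]
    rw [foldl_filter_truthy]
    have key : ∀ (v : Int) (acc : List (List Int)),
        permsDfs n k (stack ++ [v]) acc
          = acc ++ ((prodSeqs (n.filter (fun x => decide (x ≠ 0))) k).map ((stack ++ [v]) ++ ·)).filter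
              (fun s => decide ((PySem.Set.ofList s).length = 3)) := by
      intro v acc
      exact ih (stack ++ [v]) acc (by simp; omega)
    simp only [key]
    rw [PySem.List.foldl_append_eq_flatMap]
    congr 1
    show _ = ((List.flatMap (fun c => (prodSeqs _ k).map (c :: ·)) _).map (stack ++ ·)).filter _
    simp only [List.map_flatMap, List.filter_flatMap, List.map_map, Function.comp_def]
    have hca : ∀ (c : Int) (t : List Int), (stack ++ [c]) ++ t = stack ++ c :: t := by
      intro c t; simp
    simp only [hca]

theorem build_eq (C : List Int) (k : Nat) :
    (List.range k).foldl
        (fun seqs _ => seqs.flatMap (fun s => C.map (fun c => s ++ [c]))) [[]]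
      = prodSeqs C k := by
  induction k with
  | zero => rfl
  | succ k ih => rw [List.range_succ, List.foldl_append, ih, prodSeqs_succ_right]; rfl

-- ===== VERDICT (by name: the statement is the Claim_ definition above) =====
theorem perms_spec : Claim_equal_perms := by
  intro n _
  show perms n = perms_alt n
  rw [perms, permsDfs_eq n n.length [] [] (by simp), perms_alt]
  simp [build_eq]
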